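-- pv_equiv track=rewrite | github.com/filipedwan/CodeBench-Features-Extractor | Legacy extractor/tabelas_por_questao/por_questão_plagio.py | session
-- ===== SOURCE A (Python) =====
-- def session(codemirror,lista,turma):
-- 	aux1=[]
-- 	for l in lista:
-- 		contador=0
-- 		while(contador<len(codemirror)):
-- 			if(l[:len(l)-5]==codemirror[contador][:len(l)-5]):
-- 				aux1=aux1+[codemirror[contador]]
-- 			contador+=1
-- 	return aux1
-- ===== SOURCE B (Python) =====
-- def session(codemirror, lista, turma):
--     # Group codemirror once per distinct prefix length, then answer each l by one dict lookup.
--     tables = {}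
--     out = []
--     for l in lista:
--         k = len(l) - 5
--         if k not in tables:
--             d = {}
--             for c in codemirror:
--                 d[c[:k]] = d.get(c[:k], []) + [c]
--             tables[k] = d
--         out += tables[k].get(l[:k], [])
--     return out
-- ===== Notes on version B (the rewrite author's own statement) =====
-- stated objective: faster
-- what changed: B replaces the per-l rescan of codemirror by dicts built once per distinct prefix length (prefix -> ordered matching entries), answering each l with a single lookup.
import Mathlib
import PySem

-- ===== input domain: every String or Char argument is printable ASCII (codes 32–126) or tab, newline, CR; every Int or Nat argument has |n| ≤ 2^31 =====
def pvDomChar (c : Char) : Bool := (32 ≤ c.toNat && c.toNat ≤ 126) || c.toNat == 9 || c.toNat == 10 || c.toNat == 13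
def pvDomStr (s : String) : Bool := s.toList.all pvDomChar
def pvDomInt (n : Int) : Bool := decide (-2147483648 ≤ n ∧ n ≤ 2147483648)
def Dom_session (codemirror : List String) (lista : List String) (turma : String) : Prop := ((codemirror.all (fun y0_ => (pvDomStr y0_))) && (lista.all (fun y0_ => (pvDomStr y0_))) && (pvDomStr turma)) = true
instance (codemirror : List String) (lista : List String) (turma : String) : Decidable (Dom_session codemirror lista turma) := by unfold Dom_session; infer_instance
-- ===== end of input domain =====

-- B builds, once per distinct value of len(l)-5, a dict mapping each prefix to the ordered
-- list of matching codemirror entries, so each l costs one lookup instead of a full rescan.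

-- ===== PORT A =====
def session (codemirror : List String) (lista : List String) (turma : String) : List String :=
  lista.foldl (fun aux1 l =>
    (PySem.List.pyRange 0 (PySem.List.len codemirror) 1).foldl (fun aux contador =>
      if PySem.Str.slice l none (some (PySem.Str.len l - 5)) ==
         PySem.Str.slice (PySem.List.pyGetD codemirror contador "") none (some (PySem.Str.len l - 5))
      then aux ++ [PySem.List.pyGetD codemirror contador ""] else aux) aux1) []

-- ===== PORT B =====
-- the inner 'for c in codemirror: d[c[:k]] = d.get(c[:k], []) + [c]' loop of Source B
def pvBuildTable (codemirror : List String) (k : Int) : PySem.Dict String (List String) :=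
  codemirror.foldl (fun d c => d.modify (PySem.Str.slice c none (some k)) [] (· ++ [c])) PySem.Dict.empty

def session_alt (codemirror : List String) (lista : List String) (turma : String) : List String :=
  (lista.foldl (fun (st : PySem.Dict Int (PySem.Dict String (List String)) × List String) l =>
      let k := PySem.Str.len l - 5
      let tables := if st.1.contains k then st.1 else st.1.insert k (pvBuildTable codemirror k)
      (tables, st.2 ++ (tables.getD k PySem.Dict.empty).getD (PySem.Str.slice l none (some k)) []))
    (PySem.Dict.empty, [])).2

-- ===== PRECONDITION & SPEC =====
def Spec_session (codemirror : List String) (lista : List String) (turma : String) (out : List String) : Prop := out = session_alt codemirror lista turma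
instance (codemirror : List String) (lista : List String) (turma : String) (out : List String) : Decidable (Spec_session codemirror lista turma out) := by unfold Spec_session; infer_instance

-- ===== CLAIM (what is proved, stated in full; the proofs are below) =====
def Claim_equal_session : Prop := ∀ (codemirror : List String) (lista : List String) (turma : String), Dom_session codemirror lista turma → Spec_session codemirror lista turma (session codemirror lista turma)

-- ===== LEMMAS AND PROOFS =====

-- a group in B's table is exactly the in-order filter of codemirror by that prefix
theorem pvBuildTable_getD (codemirror : List String) (k : Int) (p : String) :
    (pvBuildTable codemirror k).getD p [] =
      codemirror.filter (fun c => PySem.Str.slice c none (some k) == p) := by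
  have h := PySem.Dict.getD_foldl_modify_append
    (l := codemirror.map (fun c => (PySem.Str.slice c none (some k), c)))
    (d := PySem.Dict.empty) (c := p)
  rw [List.foldl_map] at h
  unfold pvBuildTable
  rw [h]
  simp [List.filter_map, List.map_map, Function.comp_def]

-- A's inner while loop appends exactly that filter
theorem session_inner (codemirror : List String) (l : String) (aux1 : List String) :
    (PySem.List.pyRange 0 (PySem.List.len codemirror) 1).foldl (fun aux contador =>
      if PySem.Str.slice l none (some (PySem.Str.len l - 5)) ==
         PySem.Str.slice (PySem.List.pyGetD codemirror contador "") none (some (PySem.Str.len l - 5))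
      then aux ++ [PySem.List.pyGetD codemirror contador ""] else aux) aux1 =
    aux1 ++ codemirror.filter (fun c =>
      PySem.Str.slice c none (some (PySem.Str.len l - 5)) == PySem.Str.slice l none (some (PySem.Str.len l - 5))) := by
  rw [PySem.List.foldl_pyRange_zero_pyGetD codemirror ""
      (fun aux c => if PySem.Str.slice l none (some (PySem.Str.len l - 5)) ==
         PySem.Str.slice c none (some (PySem.Str.len l - 5)) then aux ++ [c] else aux) aux1]
  rw [PySem.List.foldl_append_if_eq_filter]
  congr 1
  apply List.filter_congr
  intro c _
  exact Bool.beq_comm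

-- memoisation invariant: every table stored in B's dict is the freshly built one
theorem session_loop (codemirror : List String) (lista : List String)
    (tables : PySem.Dict Int (PySem.Dict String (List String))) (out : List String)
    (hInv : ∀ k t, tables.get? k = some t → t = pvBuildTable codemirror k) :
    (lista.foldl (fun (st : PySem.Dict Int (PySem.Dict String (List String)) × List String) l =>
      let k := PySem.Str.len l - 5
      let tables := if st.1.contains k then st.1 else st.1.insert k (pvBuildTable codemirror k)
      (tables, st.2 ++ (tables.getD k PySem.Dict.empty).getD (PySem.Str.slice l none (some k)) []))
      (tables, out)).2 =
    lista.foldl (fun aux1 l =>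
      (PySem.List.pyRange 0 (PySem.List.len codemirror) 1).foldl (fun aux contador =>
        if PySem.Str.slice l none (some (PySem.Str.len l - 5)) ==
           PySem.Str.slice (PySem.List.pyGetD codemirror contador "") none (some (PySem.Str.len l - 5))
        then aux ++ [PySem.List.pyGetD codemirror contador ""] else aux) aux1) out := by
  induction lista generalizing tables out with
  | nil => rfl
  | cons l rest ih =>
    simp only [List.foldl_cons]
    have hInv' : ∀ k t,
        (if tables.contains (PySem.Str.len l - 5) = true then tables
         else tables.insert (PySem.Str.len l - 5) (pvBuildTable codemirror (PySem.Str.len l - 5))).get? k = some t →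
        t = pvBuildTable codemirror k := by
      intro k t h
      split at h
      · exact hInv k t h
      · rw [PySem.Dict.get?_insert] at h
        split at h
        · cases h; subst ‹k = _›; rfl
        · exact hInv k t h
    rw [ih _ _ hInv']
    congr 1
    have htab : (if tables.contains (PySem.Str.len l - 5) = true then tables
         else tables.insert (PySem.Str.len l - 5) (pvBuildTable codemirror (PySem.Str.len l - 5))).getD
           (PySem.Str.len l - 5) PySem.Dict.empty = pvBuildTable codemirror (PySem.Str.len l - 5) := by
      split
      · rename_i hc
        rw [PySem.Dict.contains_eq_isSome_get?] at hc
        obtain ⟨t, ht⟩ := Option.isSome_iff_exists.mp hc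
        rw [PySem.Dict.getD_eq_get?_getD, ht, Option.getD_some]
        exact hInv _ _ ht
      · exact PySem.Dict.getD_insert_self _ _ _ _
    rw [session_inner]
    simp only [htab, pvBuildTable_getD]

-- ===== VERDICT (by name: the statement is the Claim_ definition above) =====
theorem session_spec : Claim_equal_session := by
  intro codemirror lista turma _
  unfold Spec_session session session_alt
  rw [session_loop codemirror lista PySem.Dict.empty [] (by intro k t h; simp [PySem.Dict.get?_empty] at h)]
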